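-- pv_equiv track=rewrite | github.com/nyealovey/WhaleFall | app/services/account_classification/classifiers/oracle_classifier.py | _tablespace_requirement_satisfied
-- ===== SOURCE A (Python) =====
-- from collections.abc import Mapping, Sequence
-- from typing import TYPE_CHECKING, Any, cast
--
-- def _tablespace_requirement_satisfied(
--     requirement: Mapping[str, str],
--     tablespace_privileges: Sequence[dict[str, Any]],
-- ) -> bool:
--     """判断表空间权限是否满足."""
--     required_priv = requirement.get("privilege")
--     required_table = requirement.get("tablespace_name")
--     for privilege in tablespace_privileges:
--         priv_name = privilege.get("privilege")
--         tablespace_name = privilege.get("tablespace_name")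
--         priv_ok = required_priv in (priv_name, "*")
--         ts_ok = required_table in (tablespace_name, "*")
--         if priv_ok and ts_ok:
--             return True
--     return False
-- ===== SOURCE B (Python) =====
-- def _tablespace_requirement_satisfied(requirement, tablespace_privileges):
--     """Index the privileges as a set of (privilege, tablespace) pairs once,
--     then answer by case analysis on the requirement's wildcards with set probes."""
--     rp = requirement.get("privilege")
--     rt = requirement.get("tablespace_name")
--     pairs = {(p.get("privilege"), p.get("tablespace_name")) for p in tablespace_privileges}
--     if rp == "*":
--         if rt == "*":
--             return bool(pairs)
--         return rt in {t for _, t in pairs}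
--     if rt == "*":
--         return rp in {p for p, _ in pairs}
--     return (rp, rt) in pairs
-- ===== Notes on version B (the rewrite author's own statement) =====
-- stated objective: alternative
-- what changed: Replaced the per-element predicate loop by building a set of (privilege, tablespace) pairs once and answering with a case split on the requirement's wildcards via constant-size set probes.
import Mathlib
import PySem

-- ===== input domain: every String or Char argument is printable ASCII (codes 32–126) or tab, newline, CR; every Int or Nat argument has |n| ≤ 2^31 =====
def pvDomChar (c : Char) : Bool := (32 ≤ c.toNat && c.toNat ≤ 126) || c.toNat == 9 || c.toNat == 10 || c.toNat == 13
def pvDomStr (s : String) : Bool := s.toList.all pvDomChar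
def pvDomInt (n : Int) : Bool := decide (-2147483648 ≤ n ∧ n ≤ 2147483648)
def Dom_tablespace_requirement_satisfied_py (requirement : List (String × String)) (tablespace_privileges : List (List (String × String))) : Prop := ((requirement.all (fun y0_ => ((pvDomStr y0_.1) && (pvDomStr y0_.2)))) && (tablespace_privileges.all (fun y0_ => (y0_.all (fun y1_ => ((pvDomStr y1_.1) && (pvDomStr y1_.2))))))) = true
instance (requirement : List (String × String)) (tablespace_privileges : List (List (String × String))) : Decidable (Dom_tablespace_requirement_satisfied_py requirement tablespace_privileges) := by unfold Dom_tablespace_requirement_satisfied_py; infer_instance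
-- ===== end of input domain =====

-- B replaces A's per-element predicate loop by a set of (privilege, tablespace) pairs built once,
-- answered by a case split on the requirement's wildcards with set probes (alternative decomposition, same cost).

-- ===== PORT A =====
def pvLookup (d : List (String × String)) (k : String) : Option String :=
  (PySem.Dict.mk d).get? k

def tsGoA (rp rt : Option String) : List (List (String × String)) → Bool
  | [] => false
  | privilege :: rest =>
    let priv_name := pvLookup privilege "privilege"
    let tablespace_name := pvLookup privilege "tablespace_name"
    let priv_ok := rp == priv_name || rp == some "*"
    let ts_ok := rt == tablespace_name || rt == some "*"
    if priv_ok && ts_ok then true else tsGoA rp rt rest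

def tablespace_requirement_satisfied_py (requirement : List (String × String)) (tablespace_privileges : List (List (String × String))) : Bool :=
  let required_priv := pvLookup requirement "privilege"
  let required_table := pvLookup requirement "tablespace_name"
  tsGoA required_priv required_table tablespace_privileges

-- ===== PORT B =====
def tablespace_requirement_satisfied_py_alt (requirement : List (String × String)) (tablespace_privileges : List (List (String × String))) : Bool :=
  let rp := pvLookup requirement "privilege"
  let rt := pvLookup requirement "tablespace_name"
  let pairs : PySem.Set (Option String × Option String) :=
    PySem.Set.ofList (tablespace_privileges.map
      (fun p => (pvLookup p "privilege", pvLookup p "tablespace_name")))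
  if rp == some "*" then
    if rt == some "*" then !pairs.isEmpty
    else PySem.Set.contains (PySem.Set.ofList (pairs.map Prod.snd)) rt
  else if rt == some "*" then
    PySem.Set.contains (PySem.Set.ofList (pairs.map Prod.fst)) rp
  else
    PySem.Set.contains pairs (rp, rt)

-- ===== PRECONDITION & SPEC =====
def Spec_tablespace_requirement_satisfied_py (requirement : List (String × String)) (tablespace_privileges : List (List (String × String))) (out : Bool) : Prop := out = tablespace_requirement_satisfied_py_alt requirement tablespace_privileges
instance (requirement : List (String × String)) (tablespace_privileges : List (List (String × String))) (out : Bool) : Decidable (Spec_tablespace_requirement_satisfied_py requirement tablespace_privileges out) := by unfold Spec_tablespace_requirement_satisfied_py; infer_instance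

-- ===== CLAIM (what is proved, stated in full; the proofs are below) =====
def Claim_equal_tablespace_requirement_satisfied_py : Prop := ∀ (requirement : List (String × String)) (tablespace_privileges : List (List (String × String))), Dom_tablespace_requirement_satisfied_py requirement tablespace_privileges → Spec_tablespace_requirement_satisfied_py requirement tablespace_privileges (tablespace_requirement_satisfied_py requirement tablespace_privileges)

-- ===== LEMMAS AND PROOFS =====
lemma tsGoA_eq_any (rp rt : Option String) (tps : List (List (String × String))) :
    tsGoA rp rt tps = tps.any (fun p =>
      (rp == pvLookup p "privilege" || rp == some "*") &&
      (rt == pvLookup p "tablespace_name" || rt == some "*")) := by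
  induction tps with
  | nil => rfl
  | cons p rest ih =>
    simp only [tsGoA, List.any_cons]
    split_ifs with h
    · simp [h]
    · rw [ih]
      cases hc : ((rp == pvLookup p "privilege" || rp == some "*") &&
        (rt == pvLookup p "tablespace_name" || rt == some "*")) <;> simp_all

-- ===== VERDICT (by name: the statement is the Claim_ definition above) =====

lemma pvSet_ofList_isEmpty {α : Type} [BEq α] [LawfulBEq α] (l : List α) :
    (PySem.Set.ofList l).isEmpty = l.isEmpty := by
  rw [Bool.eq_iff_iff]
  simp [List.isEmpty_iff, List.eq_nil_iff_forall_not_mem, PySem.Set.mem_ofList]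

-- ===== VERDICT =====
theorem tablespace_requirement_satisfied_py_spec : Claim_equal_tablespace_requirement_satisfied_py := by
  intro requirement tps _
  unfold Spec_tablespace_requirement_satisfied_py
  unfold tablespace_requirement_satisfied_py tablespace_requirement_satisfied_py_alt
  simp only [tsGoA_eq_any]
  rw [Bool.eq_iff_iff]
  by_cases h1 : pvLookup requirement "privilege" = some "*" <;>
    by_cases h2 : pvLookup requirement "tablespace_name" = some "*"
  · simp [h1, h2, List.any_eq_true, pvSet_ofList_isEmpty,
      List.eq_nil_iff_forall_not_mem]
  · simp [h1, h2, List.any_eq_true, PySem.Set.contains, PySem.Set.mem_ofList, List.mem_map]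
    constructor <;> rintro ⟨p, hp, h⟩ <;> exact ⟨p, hp, by simp_all⟩
  · simp [h1, h2, List.any_eq_true, PySem.Set.contains, PySem.Set.mem_ofList, List.mem_map]
    constructor <;> rintro ⟨p, hp, h⟩ <;> exact ⟨p, hp, by simp_all⟩
  · simp [h1, h2, List.any_eq_true, PySem.Set.contains, PySem.Set.mem_ofList, List.mem_map]
    constructor <;> rintro ⟨p, hp, h⟩ <;> exact ⟨p, hp, by simp_all⟩
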